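-- pv_equiv track=rewrite | github.com/letmeloveyou82/Algorithm | Python/BOJ/자료구조/1283.py | specify_shortcut
-- ===== SOURCE A (Python) =====
-- def specify_shortcut(word, shortcut_key):
--     first_letter_idx = []
--     # 단어의 첫 글자의 인덱스들을 저장
--     for i in range(len(word)):
--         if i == 0 and word[i] != ' ':
--             first_letter_idx.append(i)
--         if word[i-1] == ' ' and word[i] != ' ':
--             first_letter_idx.append(i)
--     # 1. 단어의 첫 글자 중 단축키로 아직 지정되지 않은 게 있다면 그 알파벳을 단축키로 지정
--     for i in first_letter_idx:
--         if word[i] != ' ' and word[i].upper() not in shortcut_key and word[i].lower() not in shortcut_key: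
--             shortcut_key.append(word[i]) # 단축키 리스트에 해당 알파벳 추가
--             word[i] = '['+word[i]+']' # 단축키로 지정된 알파벳은 좌우에 [] 괄호 씌워줌
--             return word # 단축키 지정하면 함수 종료
--     # 2. 모든 단어 첫 글자가 이미 지정되어 있다면, 왼쪽에서부터 차례대로 알파벳을 보면서 단축키로 지정 안 된 것이 있다면 단축키로 지정
--     for i in range(len(word)):
--         if word[i] != ' ' and word[i].upper() not in shortcut_key and word[i].lower() not in shortcut_key:
--             shortcut_key.append(word[i])
--             word[i] = '['+word[i]+']'
--             return word
-- ===== SOURCE B (Python) =====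
-- def specify_shortcut(word, shortcut_key):
--     # Single left-to-right pass tracking two candidate indices instead of
--     # building an index list and doing two separate scans.
--     # Mutates word and shortcut_key in place like the original.
--     first_choice = None  # earliest word-initial, non-space, unused letter
--     any_choice = None    # earliest non-space unused letter
--     for i in range(len(word)):
--         c = word[i]
--         if c == ' ':
--             continue
--         if c.upper() in shortcut_key or c.lower() in shortcut_key:
--             continue
--         if any_choice is None:
--             any_choice = i
--         if first_choice is None and (i == 0 or word[i-1] == ' '):
--             first_choice = i
--     choice = first_choice if first_choice is not None else any_choice
--     if choice is None:
--         return None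
--     shortcut_key.append(word[choice])
--     word[choice] = '[' + word[choice] + ']'
--     return word
-- ===== Notes on version B (the rewrite author's own statement) =====
-- stated objective: alternative
-- what changed: Replaced A's three loops (build a list of word-initial indices, scan it, then rescan the whole list) by a single left-to-right pass that tracks the earliest word-initial candidate and the earliest overall candidate, picking between them afterwards.
import Mathlib
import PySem

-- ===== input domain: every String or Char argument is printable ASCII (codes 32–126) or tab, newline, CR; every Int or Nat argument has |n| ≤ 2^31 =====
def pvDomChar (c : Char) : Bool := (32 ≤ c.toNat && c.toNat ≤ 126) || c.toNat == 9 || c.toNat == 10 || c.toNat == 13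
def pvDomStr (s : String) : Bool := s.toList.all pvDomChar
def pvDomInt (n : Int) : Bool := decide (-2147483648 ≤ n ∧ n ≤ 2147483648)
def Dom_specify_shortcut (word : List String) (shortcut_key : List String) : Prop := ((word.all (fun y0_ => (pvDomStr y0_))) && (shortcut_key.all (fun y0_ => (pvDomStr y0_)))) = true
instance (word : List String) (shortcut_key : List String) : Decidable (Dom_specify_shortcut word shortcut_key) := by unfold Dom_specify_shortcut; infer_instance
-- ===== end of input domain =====

-- B replaces A's three loops by one pass tracking two candidate indices; equivalence is about
-- the RETURN value (both Pythons also mutate word/shortcut_key in place in the same way).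

-- ===== PORT A =====
-- the test 'word[i] != " " and word[i].upper() not in shortcut_key and word[i].lower() not in shortcut_key'
def pvOkA (shortcut_key : List String) (c : String) : Bool :=
  c != " " && !(shortcut_key.contains (PySem.Str.upper c)) && !(shortcut_key.contains (PySem.Str.lower c))

def specify_shortcut (word : List String) (shortcut_key : List String) : Option (List String) :=
  -- first two loops fused into the match scrutinee: build first_letter_idx, then scan it (early return)
  match (((List.range word.length).foldl (fun acc i =>
    let acc := if i = 0 ∧ word.getD i "" ≠ " " then acc ++ [i] else acc
    if PySem.List.pyGetD word ((i : Int) - 1) "" = " " ∧ word.getD i "" ≠ " " then acc ++ [i] else acc) []).find? (fun i => pvOkA shortcut_key (word.getD i ""))) with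
  | some i => some (word.set i ("[" ++ word.getD i "" ++ "]"))
  | none =>
    -- third loop: first index passing the test, early return; else fall through to None
    match (List.range word.length).find? (fun i => pvOkA shortcut_key (word.getD i "")) with
    | some i => some (word.set i ("[" ++ word.getD i "" ++ "]"))
    | none => none

-- ===== PORT B =====
def pvUnusedB (shortcut_key : List String) (c : String) : Bool :=
  !(shortcut_key.contains (PySem.Str.upper c)) && !(shortcut_key.contains (PySem.Str.lower c))

def specify_shortcut_alt (word : List String) (shortcut_key : List String) : Option (List String) :=
  -- one pass: state = (first_choice, any_choice); then pick
  let st := (List.range word.length).foldl (fun (st : Option Nat × Option Nat) i =>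
    let c := word.getD i ""
    if c = " " then st
    else if !(pvUnusedB shortcut_key c) then st
    else
      let ac := if st.2 = none then some i else st.2
      let fc := if st.1 = none ∧ (i = 0 ∨ word.getD (i - 1) "" = " ") then some i else st.1
      (fc, ac)) (none, none)
  match st.1.orElse (fun _ => st.2) with
  | some i => some (word.set i ("[" ++ word.getD i "" ++ "]"))
  | none => none

-- ===== PRECONDITION & SPEC =====
def Spec_specify_shortcut (word : List String) (shortcut_key : List String) (out : Option (List String)) : Prop := out = specify_shortcut_alt word shortcut_key
instance (word : List String) (shortcut_key : List String) (out : Option (List String)) : Decidable (Spec_specify_shortcut word shortcut_key out) := by unfold Spec_specify_shortcut; infer_instance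

-- ===== CLAIM (what is proved, stated in full; the proofs are below) =====
def Claim_equal_specify_shortcut : Prop := ∀ (word : List String) (shortcut_key : List String), Dom_specify_shortcut word shortcut_key → Spec_specify_shortcut word shortcut_key (specify_shortcut word shortcut_key)

-- ===== LEMMAS AND PROOFS =====

-- word-initial position (for the proof only)
def pFL (word : List String) (i : Nat) : Bool := i == 0 || word.getD (i - 1) "" == " "

-- B's fold computes the two find?s over the scanned prefix
lemma alt_fold_eq (word shortcut_key : List String) (k : Nat) :
    (List.range k).foldl (fun (st : Option Nat × Option Nat) i =>
      let c := word.getD i ""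
      if c = " " then st
      else if !(pvUnusedB shortcut_key c) then st
      else
        let ac := if st.2 = none then some i else st.2
        let fc := if st.1 = none ∧ (i = 0 ∨ word.getD (i - 1) "" = " ") then some i else st.1
        (fc, ac)) (none, none)
    = ((List.range k).find? (fun i => pvOkA shortcut_key (word.getD i "") && pFL word i),
       (List.range k).find? (fun i => pvOkA shortcut_key (word.getD i ""))) := by
  induction k with
  | zero => simp
  | succ k ih =>
    rw [List.range_succ, List.foldl_append, ih]
    simp only [List.foldl_cons, List.foldl_nil, List.find?_append, List.find?_cons,
      List.find?_nil, List.getD_eq_getElem?_getD]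
    by_cases hsp : word[k]?.getD "" = " "
    · have hk : pvOkA shortcut_key " " = false := by unfold pvOkA; simp
      simp [hsp, hk]
    · by_cases hu : pvUnusedB shortcut_key (word[k]?.getD "") = true
      · have hk : pvOkA shortcut_key (word[k]?.getD "") = true := by
          unfold pvOkA; unfold pvUnusedB at hu; rw [Bool.and_assoc, hu]; simp [hsp]
        by_cases hf : (k = 0 ∨ word[k - 1]?.getD "" = " ")
        · have hfl : pFL word k = true := by
            rcases hf with h | h <;> simp [pFL, h]
          cases hF : List.find? (fun i => pvOkA shortcut_key (word[i]?.getD "") && pFL word i) (List.range k) <;>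
            cases hG : List.find? (fun i => pvOkA shortcut_key (word[i]?.getD "")) (List.range k) <;>
              simp [hsp, hu, hk, hfl, hF, hG, hf]
        · push_neg at hf
          have hfl : pFL word k = false := by simp [pFL, hf.1, hf.2]
          cases hF : List.find? (fun i => pvOkA shortcut_key (word[i]?.getD "") && pFL word i) (List.range k) <;>
            cases hG : List.find? (fun i => pvOkA shortcut_key (word[i]?.getD "")) (List.range k) <;>
              simp [hsp, hu, hk, hfl, hF, hG, hf.1, hf.2]
      · have hk : pvOkA shortcut_key (word[k]?.getD "") = false := by
          unfold pvOkA; unfold pvUnusedB at hu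
          rw [Bool.not_eq_true] at hu
          rw [Bool.and_assoc, hu]; simp
        rw [Bool.not_eq_true] at hu
        simp [hsp, hu, hk]

-- A's first loop's list, scanned with find?, equals find? of (ok ∧ word-initial) over the range
lemma a_fold_find (word shortcut_key : List String) (k : Nat) (acc : List Nat) :
    (((List.range k).foldl (fun acc i =>
      let acc := if i = 0 ∧ word.getD i "" ≠ " " then acc ++ [i] else acc
      if PySem.List.pyGetD word ((i : Int) - 1) "" = " " ∧ word.getD i "" ≠ " " then acc ++ [i] else acc) acc).find?
        (fun i => pvOkA shortcut_key (word.getD i "")))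
    = ((acc.find? (fun i => pvOkA shortcut_key (word.getD i ""))).orElse
        (fun _ => (List.range k).find? (fun i => pvOkA shortcut_key (word.getD i "") && pFL word i))) := by
  induction k generalizing acc with
  | zero =>
    simp only [List.getD_eq_getElem?_getD, List.range_zero, List.foldl_nil, List.find?_nil]
    cases h : acc.find? (fun i => pvOkA shortcut_key (word[i]?.getD "")) <;> simp [h, Option.orElse]
  | succ k ih =>
    rw [List.range_succ, List.foldl_append]
    simp only [List.foldl_cons, List.foldl_nil, List.getD_eq_getElem?_getD] at ih ⊢
    by_cases hw : word[k]?.getD "" = " "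
    · have hp : pvOkA shortcut_key (word[k]?.getD "") = false := by
        unfold pvOkA; rw [hw]; simp
      rw [if_neg (by simp [hw]), if_neg (by simp [hw]), ih, List.find?_append]
      cases hA : List.find? (fun i => pvOkA shortcut_key (word[i]?.getD "")) acc <;>
        cases hF : List.find? (fun i => pvOkA shortcut_key (word[i]?.getD "") && pFL word i) (List.range k) <;>
          simp [Option.orElse, hA, hF, hp]
    · by_cases h0 : k = 0
      · subst h0
        have hfl : pFL word 0 = true := by simp [pFL]
        by_cases hc2 : PySem.List.pyGetD word (((0 : Nat) : Int) - 1) "" = " " ∧ word[0]?.getD "" ≠ " "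
        · rw [if_pos hc2, if_pos ⟨rfl, hw⟩]
          simp only [List.range_zero, List.foldl_nil, List.find?_nil, List.append_assoc,
            List.find?_append]
          cases hA : List.find? (fun i => pvOkA shortcut_key (word[i]?.getD "")) acc <;>
            cases hpk : pvOkA shortcut_key (word[0]?.getD "") <;>
              simp [Option.orElse, hA, hpk, hfl]
        · rw [if_neg hc2, if_pos ⟨rfl, hw⟩]
          simp only [List.range_zero, List.foldl_nil, List.find?_nil, List.find?_append]
          cases hA : List.find? (fun i => pvOkA shortcut_key (word[i]?.getD "")) acc <;>
            cases hpk : pvOkA shortcut_key (word[0]?.getD "") <;>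
              simp [Option.orElse, hA, hpk, hfl]
      · have hprev : PySem.List.pyGetD word (((k : Nat) : Int) - 1) "" = word[k - 1]?.getD "" := by
          have hc : ((k : Nat) : Int) - 1 = ((k - 1 : Nat) : Int) := by omega
          rw [hc, PySem.List.pyGetD_natCast, List.getD_eq_getElem?_getD]
        simp only [hprev]
        by_cases hpv : word[k - 1]?.getD "" = " "
        · have hfl : pFL word k = true := by simp [pFL, h0, hpv]
          rw [if_pos ⟨hpv, hw⟩, if_neg (by simp [h0]), List.find?_append, List.find?_append, ih]
          cases hA : List.find? (fun i => pvOkA shortcut_key (word[i]?.getD "")) acc <;>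
            cases hF : List.find? (fun i => pvOkA shortcut_key (word[i]?.getD "") && pFL word i) (List.range k) <;>
              cases hpk : pvOkA shortcut_key (word[k]?.getD "") <;>
                simp [Option.orElse, hA, hF, hpk, hfl]
        · have hfl : pFL word k = false := by simp [pFL, h0, hpv]
          rw [if_neg (by simp [hpv]), if_neg (by simp [h0]), ih, List.find?_append]
          cases hA : List.find? (fun i => pvOkA shortcut_key (word[i]?.getD "")) acc <;>
            cases hF : List.find? (fun i => pvOkA shortcut_key (word[i]?.getD "") && pFL word i) (List.range k) <;>
              simp [Option.orElse, hA, hF, hfl]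

-- ===== VERDICT (by name: the statement is the Claim_ definition above) =====
theorem specify_shortcut_spec : Claim_equal_specify_shortcut := by
  intro word shortcut_key _
  unfold Spec_specify_shortcut specify_shortcut specify_shortcut_alt
  simp only [alt_fold_eq]
  simp only [a_fold_find]
  simp only [List.find?_nil]
  cases h1 : (List.range word.length).find? (fun i => pvOkA shortcut_key (word.getD i "") && pFL word i) <;>
    cases h2 : (List.range word.length).find? (fun i => pvOkA shortcut_key (word.getD i "")) <;>
      simp only [h1, h2, Option.orElse]
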